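-- pv_equiv track=rewrite | github.com/kennethjy/compbio-final-project | SEIR.py | populate_grid
-- ===== SOURCE A (Python) =====
-- def get_cell(x, y, cell_size):
--     return x // cell_size, y // cell_size
--
-- def populate_grid(people, cell_size):
--     grid = {}
--     for p in people:
--         cell = get_cell(p[1], p[2], cell_size)
--         if cell not in grid:
--             grid[cell] = []
--         grid[cell].append(p)
--     return grid
-- ===== SOURCE B (Python) =====
-- def populate_grid(people, cell_size):
--     # two-pass grouping: compute every cell key first, then build each cell's
--     # full member list in one gather per distinct key (first-occurrence order)
--     keys = [(p[1] // cell_size, p[2] // cell_size) for p in people]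
--     grid = {}
--     for k in keys:
--         if k not in grid:
--             grid[k] = [p for p, kk in zip(people, keys) if kk == k]
--     return grid
-- ===== Notes on version B (the rewrite author's own statement) =====
-- stated objective: alternative
-- what changed: B precomputes all cell keys in one pass and then, for each distinct key in first-occurrence order, gathers that cell's whole member list with a single comprehension, instead of A's incremental append-to-dict-entry loop.
import Mathlib
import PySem

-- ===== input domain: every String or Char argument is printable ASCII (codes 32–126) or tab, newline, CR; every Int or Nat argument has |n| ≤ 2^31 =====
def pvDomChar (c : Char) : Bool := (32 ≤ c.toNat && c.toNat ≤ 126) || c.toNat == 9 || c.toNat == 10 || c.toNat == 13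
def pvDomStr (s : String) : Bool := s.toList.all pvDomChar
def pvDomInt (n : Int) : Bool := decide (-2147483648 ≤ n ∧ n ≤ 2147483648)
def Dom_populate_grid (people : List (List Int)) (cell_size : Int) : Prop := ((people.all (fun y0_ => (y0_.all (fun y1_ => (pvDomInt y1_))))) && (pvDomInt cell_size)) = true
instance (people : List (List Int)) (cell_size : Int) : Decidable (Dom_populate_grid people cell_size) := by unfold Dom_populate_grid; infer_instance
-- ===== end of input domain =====

-- B precomputes all cell keys, then gathers each distinct cell's full member list in one
-- comprehension per cell (first-occurrence order), instead of A's incremental dict-append loop.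


-- ===== PORT A =====
def get_cell (x y cell_size : Int) : Int × Int :=
  (PySem.Int.floordiv x cell_size, PySem.Int.floordiv y cell_size)

-- dict keyed by an (Int × Int) cell; the returned dict's items are flattened to triples
-- per the type convention.  p[1]/p[2] via pyGetD (in range under Pre_).
def populate_grid (people : List (List Int)) (cell_size : Int) : List (Int × Int × List (List Int)) :=
  (people.foldl (fun grid p =>
      let cell := get_cell (PySem.List.pyGetD p 1 0) (PySem.List.pyGetD p 2 0) cell_size
      let grid := if grid.contains cell then grid else grid.insert cell ([] : List (List Int))
      grid.modify cell [] (fun s => s ++ [p]))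
    PySem.Dict.empty).items.map (fun kv => (kv.1.1, kv.1.2, kv.2))

-- ===== PORT B =====
def populate_grid_alt (people : List (List Int)) (cell_size : Int) : List (Int × Int × List (List Int)) :=
  let keys := people.map (fun p =>
      (PySem.Int.floordiv (PySem.List.pyGetD p 1 0) cell_size,
       PySem.Int.floordiv (PySem.List.pyGetD p 2 0) cell_size))
  (keys.foldl (fun grid k =>
      if grid.contains k then grid
      else grid.insert k (((people.zip keys).filter (fun pk => pk.2 == k)).map (fun pk => pk.1)))
    PySem.Dict.empty).items.map (fun kv => (kv.1.1, kv.1.2, kv.2))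

-- ===== PRECONDITION & SPEC =====
-- Pre_ excludes exactly the inputs where the Python A raises: cell_size = 0 with a nonempty
-- people list (ZeroDivisionError) and any person with fewer than 3 entries (IndexError on p[1]/p[2]).
def Pre_populate_grid (people : List (List Int)) (cell_size : Int) : Prop :=
  (people = [] ∨ cell_size ≠ 0) ∧ ∀ p ∈ people, 3 ≤ p.length
instance (people : List (List Int)) (cell_size : Int) : Decidable (Pre_populate_grid people cell_size) := by unfold Pre_populate_grid; infer_instance

def pvWitness_populate_grid : List (List Int) × Int := ([[0, 3, 5], [1, -4, 2], [2, 4, 5]], 3)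

def Spec_populate_grid (people : List (List Int)) (cell_size : Int) (out : List (Int × Int × List (List Int))) : Prop := out = populate_grid_alt people cell_size
instance (people : List (List Int)) (cell_size : Int) (out : List (Int × Int × List (List Int))) : Decidable (Spec_populate_grid people cell_size out) := by unfold Spec_populate_grid; infer_instance

-- ===== CLAIM (what is proved, stated in full; the proofs are below) =====
def Claim_equal_populate_grid : Prop := ∀ (people : List (List Int)) (cell_size : Int), Dom_populate_grid people cell_size → Pre_populate_grid people cell_size → Spec_populate_grid people cell_size (populate_grid people cell_size)

-- ===== LEMMAS AND PROOFS =====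

theorem pvFind?_beq {κ : Type} [BEq κ] [LawfulBEq κ] (K : List κ) (c : κ) (h : c ∈ K) :
    K.find? (fun k => k == c) = some c := by
  induction K with
  | nil => cases h
  | cons a K ih =>
    by_cases hac : a = c
    · subst hac; simp [List.find?]
    · cases h with
      | head => exact absurd rfl hac
      | tail _ h =>
        have hb : (a == c) = false := by simp [hac]
        simp [List.find?, hb, ih h]

-- B's zip-comprehension gathers exactly the people whose key is k
theorem pvZipFilter {α κ : Type} [BEq κ] (l : List α) (f : α → κ) (k : κ) :
    (((l.zip (l.map f)).filter (fun pk => pk.2 == k)).map (fun pk => pk.1))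
      = l.filter (fun p => f p == k) := by
  induction l with
  | nil => rfl
  | cons a l ih =>
    by_cases h : (f a == k) = true
    · simp [List.filter, h, ih]
    · simp [List.filter, h, ih]

theorem pvMem_dedup {κ : Type} [BEq κ] [LawfulBEq κ] (K : List κ) (c : κ) :
    c ∈ PySem.List.dedup K ↔ c ∈ K := by
  simp [PySem.List.dedup_eq_ofList, PySem.Set.mem_ofList]

theorem pvDedup_snoc {κ : Type} [BEq κ] [LawfulBEq κ] (K : List κ) (c : κ) :
    PySem.List.dedup (K ++ [c])
      = if c ∈ K then PySem.List.dedup K else PySem.List.dedup K ++ [c] := by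
  have h : PySem.List.dedup (K ++ [c]) = PySem.Set.add (PySem.List.dedup K) c := by
    simp [PySem.List.dedup, PySem.Set.ofList, List.foldl_append]
  rw [h]
  unfold PySem.Set.add
  by_cases hc : c ∈ K
  · simp [hc]
  · simp [hc]

theorem pvGridB_items {α κ : Type} [BEq κ] [LawfulBEq κ] (ks : List κ) (G : κ → List α) :
    (ks.foldl (fun grid k =>
        if grid.contains k then grid else grid.insert k (G k))
      PySem.Dict.empty).items
    = (PySem.List.dedup ks).map (fun k => (k, G k)) := by
  induction ks using List.reverseRecOn with
  | nil => rfl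
  | append_singleton ks c ih =>
    rw [List.foldl_append, List.foldl_cons, List.foldl_nil,
        PySem.Dict.ext (y := PySem.Dict.mk ((PySem.List.dedup ks).map (fun k => (k, G k)))) ih,
        pvDedup_snoc]
    by_cases hc : c ∈ ks
    · simp [hc]
    · simp [hc, PySem.Dict.insert, PySem.Dict.contains]

theorem pvGridA_items {α κ : Type} [BEq κ] [LawfulBEq κ] (f : α → κ) (l : List α) :
    (l.foldl (fun grid p =>
        let cell := f p
        let grid := if grid.contains cell then grid else grid.insert cell ([] : List α)
        grid.modify cell [] (fun s => s ++ [p]))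
      PySem.Dict.empty).items
    = (PySem.List.dedup (l.map f)).map (fun k => (k, l.filter (fun p => f p == k))) := by
  induction l using List.reverseRecOn with
  | nil => rfl
  | append_singleton l x ih =>
    rw [List.foldl_append, List.foldl_cons, List.foldl_nil,
        PySem.Dict.ext (y := PySem.Dict.mk ((PySem.List.dedup (l.map f)).map
          (fun k => (k, l.filter (fun p => f p == k))))) ih,
        List.map_append]
    simp only [List.map_cons, List.map_nil]
    rw [pvDedup_snoc]
    by_cases hc : f x ∈ l.map f
    · -- existing cell: in-place append at its entry
      rw [if_pos hc]
      have hcK : f x ∈ PySem.List.dedup (l.map f) := (pvMem_dedup _ _).2 hc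
      have hfind : (PySem.List.dedup (l.map f)).find? (fun k => k == f x) = some (f x) :=
        pvFind?_beq _ _ hcK
      have hany : (PySem.List.dedup (l.map f)).any (fun k => k == f x) = true := by
        simp only [List.any_eq_true]
        exact ⟨f x, hcK, by simp⟩
      simp only [PySem.Dict.contains, PySem.Dict.modify, PySem.Dict.insert, PySem.Dict.getD,
        PySem.Dict.get?, List.any_map, Function.comp_def, hany, if_true,
        List.find?_map, hfind, Option.map_some, Option.getD_some, List.map_map,
        List.filter_append]
      congr 1
      funext k
      by_cases hk : k = f x
      · subst hk; simp [List.filter]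
      · have hb : (k == f x) = false := beq_eq_false_iff_ne.mpr hk
        have hb2 : (f x == k) = false := beq_eq_false_iff_ne.mpr (fun h => hk h.symm)
        simp [List.filter, hb, hb2]
    · -- fresh cell: a new entry is appended
      rw [if_neg hc]
      have hmem : ∀ k ∈ PySem.List.dedup (l.map f), (k == f x) = false := by
        intro k hkmem
        exact beq_eq_false_iff_ne.mpr (fun h => hc (h ▸ (pvMem_dedup _ _).1 hkmem))
      have hany : ((PySem.List.dedup (l.map f)).any fun k => k == f x) = false := by
        simp only [List.any_eq_false]
        intro k hkmem
        simp [hmem k hkmem]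
      have hfindnone : (PySem.List.dedup (l.map f)).find? (fun k => k == f x) = none := by
        rw [List.find?_eq_none]
        intro k hkmem
        simp [hmem k hkmem]
      have hfilter : l.filter (fun p => f p == f x) = [] := by
        rw [List.filter_eq_nil_iff]
        intro p hp
        simp only [beq_iff_eq]
        exact fun h => hc (h ▸ List.mem_map_of_mem hp)
      simp only [PySem.Dict.contains, PySem.Dict.modify, PySem.Dict.insert, PySem.Dict.getD,
        PySem.Dict.get?, List.any_map, Function.comp_def, hany, Bool.false_eq_true, if_false,
        List.any_append, List.any_cons, List.any_nil, BEq.refl, Bool.or_true, Bool.or_false,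
        if_true, List.find?_append, List.find?_map, hfindnone, Option.map_none,
        List.find?_cons, List.map_append, List.map_map,
        List.filter_append]
      congr 1
      · apply List.map_congr_left
        intro k hkmem
        have hb := hmem k hkmem
        have hb2 : (f x == k) = false :=
          beq_eq_false_iff_ne.mpr (fun h => (beq_eq_false_iff_ne.mp hb) h.symm)
        simp [hb, hb2, List.filter]
      · simp [hfilter, List.filter]

-- ===== VERDICT (by name: the statement is the Claim_ definition above) =====
theorem populate_grid_spec : Claim_equal_populate_grid := by
  intro people cell_size _ _
  show _ = _
  simp only [populate_grid, populate_grid_alt, get_cell]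
  rw [pvGridA_items (fun p =>
        ((PySem.Int.floordiv (PySem.List.pyGetD p 1 0) cell_size,
          PySem.Int.floordiv (PySem.List.pyGetD p 2 0) cell_size) : Int × Int)),
      pvGridB_items]
  congr 1
  congr 1
  funext k
  rw [pvZipFilter people (fun p =>
      (PySem.Int.floordiv (PySem.List.pyGetD p 1 0) cell_size,
       PySem.Int.floordiv (PySem.List.pyGetD p 2 0) cell_size)) k]
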